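-- pv_equiv track=rewrite | github.com/Augusto-Rabbia/lcc | 1ro/1ro Segundo Cuatrimestre/Prog II/Final/Augusto Rabbia - Final Programación II/Examen_Final.py | diagonales_posibles
-- ===== SOURCE A (Python) =====
-- def diagonales_posibles(dimension, diag):
--     """diagonales_posibles: int, int -> list[tuple(int,int)]\n
--     Dada la dimensión del tablero, encuentra dónde es posible\n
--     que se encuentren 4 fichas seguidas en diagonal.\n
--     diag = 0 es la diagonal principal \n
--     diag != 0 es la diagonal secundaria"""
--     posiciones_iniciales = []
--     if diag == 0:
--         for row in range(dimension-3):
--             for col in range(dimension-4):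
--                 if (row == 0 or col == 0):
--                     posiciones_iniciales.append((row,col))
--     else:
--         for row in range(dimension-3):
--             for col in range(3-row, dimension-1):
--                 if (row == 0 or col == dimension-2):
--                     posiciones_iniciales.append((row,col))
--     return posiciones_iniciales
-- ===== SOURCE B (Python) =====
-- def diagonales_posibles(dimension, diag):
--     """Closed-form O(n) enumeration of the border cells A's nested scan finds."""
--     if dimension < 5:
--         return []
--     if diag == 0:
--         return [(0, c) for c in range(dimension - 4)] + \
--                [(r, 0) for r in range(1, dimension - 3)]
--     return [(0, c) for c in range(3, dimension - 1)] + \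
--            [(r, dimension - 2) for r in range(1, dimension - 3)]
-- ===== Notes on version B (the rewrite author's own statement) =====
-- stated objective: faster
-- what changed: Replaced the O(n^2) nested row/column scan with filter conditions by a closed-form O(n) direct enumeration of the two border segments (top row, then the left/right column) in the same order.
import Mathlib
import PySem

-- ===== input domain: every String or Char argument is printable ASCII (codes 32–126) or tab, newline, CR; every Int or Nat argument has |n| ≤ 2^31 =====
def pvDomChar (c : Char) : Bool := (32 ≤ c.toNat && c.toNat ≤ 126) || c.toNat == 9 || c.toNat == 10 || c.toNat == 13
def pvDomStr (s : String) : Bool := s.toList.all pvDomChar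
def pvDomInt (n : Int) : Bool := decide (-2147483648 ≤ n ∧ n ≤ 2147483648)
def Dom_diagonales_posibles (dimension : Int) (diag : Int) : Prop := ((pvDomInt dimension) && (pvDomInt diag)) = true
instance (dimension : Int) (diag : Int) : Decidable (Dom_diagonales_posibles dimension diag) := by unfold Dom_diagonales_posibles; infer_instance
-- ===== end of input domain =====

-- B replaces A's O(n^2) nested border scan by a closed-form O(n) enumeration of the same border cells in the same order.


-- ===== PORT A =====
def diagonales_posibles (dimension : Int) (diag : Int) : List (Int × Int) :=
  if diag == 0 then
    (PySem.List.pyRange 0 (dimension - 3) 1).foldl (fun acc row =>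
      (PySem.List.pyRange 0 (dimension - 4) 1).foldl (fun acc col =>
        if row == 0 || col == 0 then acc ++ [(row, col)] else acc) acc) []
  else
    (PySem.List.pyRange 0 (dimension - 3) 1).foldl (fun acc row =>
      (PySem.List.pyRange (3 - row) (dimension - 1) 1).foldl (fun acc col =>
        if row == 0 || col == dimension - 2 then acc ++ [(row, col)] else acc) acc) []

-- ===== PORT B =====
def diagonales_posibles_alt (dimension : Int) (diag : Int) : List (Int × Int) :=
  if dimension < 5 then []
  else if diag == 0 then
    (PySem.List.pyRange 0 (dimension - 4) 1).map (fun c => ((0 : Int), c)) ++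
    (PySem.List.pyRange 1 (dimension - 3) 1).map (fun r => (r, (0 : Int)))
  else
    (PySem.List.pyRange 3 (dimension - 1) 1).map (fun c => ((0 : Int), c)) ++
    (PySem.List.pyRange 1 (dimension - 3) 1).map (fun r => (r, dimension - 2))

-- ===== PRECONDITION & SPEC =====
def Spec_diagonales_posibles (dimension : Int) (diag : Int) (out : List (Int × Int)) : Prop := out = diagonales_posibles_alt dimension diag
instance (dimension : Int) (diag : Int) (out : List (Int × Int)) : Decidable (Spec_diagonales_posibles dimension diag out) := by unfold Spec_diagonales_posibles; infer_instance

-- ===== CLAIM (what is proved, stated in full; the proofs are below) =====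
def Claim_equal_diagonales_posibles : Prop := ∀ (dimension : Int) (diag : Int), Dom_diagonales_posibles dimension diag → Spec_diagonales_posibles dimension diag (diagonales_posibles dimension diag)

-- ===== LEMMAS AND PROOFS =====

-- A's nested loop as a flatMap of filtered column ranges.
theorem dp_flatMap (dimension : Int) (diag : Int) :
    diagonales_posibles dimension diag =
      if diag == 0 then
        (PySem.List.pyRange 0 (dimension - 3) 1).flatMap (fun row =>
          ((PySem.List.pyRange 0 (dimension - 4) 1).filter (fun col => row == 0 || col == 0)).map
            (fun col => (row, col)))
      else
        (PySem.List.pyRange 0 (dimension - 3) 1).flatMap (fun row =>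
          ((PySem.List.pyRange (3 - row) (dimension - 1) 1).filter (fun col => row == 0 || col == dimension - 2)).map
            (fun col => (row, col))) := by
  unfold diagonales_posibles
  simp only [PySem.List.foldl_append_if, PySem.List.foldl_append_eq_flatMap, List.nil_append]

-- no column of range(1, m) passes 'col == t' when t < 1
theorem filter_eq_nil_of_lt {m t : Int} (ht : t < 1) :
    (PySem.List.pyRange 1 m 1).filter (fun col => col == t) = [] := by
  rw [List.filter_eq_nil_iff]
  intro x hx
  rw [PySem.List.mem_pyRange_one] at hx
  simp only [beq_iff_eq]
  omega

theorem filter_eq_nil_of_ge {a m t : Int} (ht : m ≤ t) :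
    (PySem.List.pyRange a m 1).filter (fun col => col == t) = [] := by
  rw [List.filter_eq_nil_iff]
  intro x hx
  rw [PySem.List.mem_pyRange_one] at hx
  simp only [beq_iff_eq]
  omega

-- ===== VERDICT (by name: the statement is the Claim_ definition above) =====
theorem diagonales_posibles_spec : Claim_equal_diagonales_posibles := by
  intro dimension diag _
  unfold Spec_diagonales_posibles diagonales_posibles_alt
  rw [dp_flatMap]
  by_cases hsmall : dimension < 5
  · simp only [if_pos hsmall]
    by_cases hd : diag == 0
    · simp only [if_pos hd]
      rw [List.flatMap_eq_nil_iff]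
      intro row _
      rw [PySem.List.pyRange_one_eq_nil (by omega)]
      simp
    · simp only [if_neg hd]
      rw [List.flatMap_eq_nil_iff]
      intro row hrow
      rw [PySem.List.mem_pyRange_one] at hrow
      rw [PySem.List.pyRange_one_eq_nil (by omega)]
      simp
  · simp only [if_neg hsmall]
    have h5 : 5 ≤ dimension := by omega
    have hrows : PySem.List.pyRange 0 (dimension - 3) 1 =
        0 :: PySem.List.pyRange 1 (dimension - 3) 1 := by
      rw [PySem.List.pyRange_one_cons (by omega)]
      norm_num
    by_cases hd : diag == 0
    · simp only [if_pos hd, hrows, List.flatMap_cons]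
      have h0 : ((PySem.List.pyRange 0 (dimension - 4) 1).filter
          (fun col => (0 : Int) == 0 || col == 0)) = PySem.List.pyRange 0 (dimension - 4) 1 := by
        simp
      rw [h0]
      congr 1
      rw [List.flatMap_congr (g := fun row => [(row, (0 : Int))])]
      · exact List.map_eq_flatMap.symm
      · intro row hrow
        rw [PySem.List.mem_pyRange_one] at hrow
        have hr0 : (row == (0 : Int)) = false := by simp; omega
        have hcols : PySem.List.pyRange 0 (dimension - 4) 1 =
            0 :: PySem.List.pyRange 1 (dimension - 4) 1 := by
          rw [PySem.List.pyRange_one_cons (by omega)]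
          norm_num
        simp only [hr0, Bool.false_or, hcols, List.filter_cons]
        rw [show ((0 : Int) == 0) = true by simp, filter_eq_nil_of_lt (by omega)]
        simp
    · simp only [if_neg hd, hrows, List.flatMap_cons]
      have h0 : ((PySem.List.pyRange (3 - 0) (dimension - 1) 1).filter
          (fun col => (0 : Int) == 0 || col == dimension - 2)) =
          PySem.List.pyRange 3 (dimension - 1) 1 := by
        norm_num
      rw [h0]
      congr 1
      rw [List.flatMap_congr (g := fun row => [(row, dimension - 2)])]
      · exact List.map_eq_flatMap.symm
      · intro row hrow
        rw [PySem.List.mem_pyRange_one] at hrow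
        have hr0 : (row == (0 : Int)) = false := by simp; omega
        have hcols : PySem.List.pyRange (3 - row) (dimension - 1) 1 =
            PySem.List.pyRange (3 - row) (dimension - 2) 1 ++
            PySem.List.pyRange (dimension - 2) (dimension - 1) 1 :=
          PySem.List.pyRange_one_append _ _ _ (by omega) (by omega)
        have hsing : PySem.List.pyRange (dimension - 2) (dimension - 1) 1 = [dimension - 2] := by
          rw [show dimension - 1 = (dimension - 2) + 1 by ring, PySem.List.pyRange_one_singleton]
        simp only [hr0, Bool.false_or, hcols, hsing, List.filter_append,
          filter_eq_nil_of_ge (le_refl (dimension - 2)), List.filter_cons]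
        simp
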